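-- pv_equiv track=rewrite | github.com/ryan-reid/BT-BKDiff | scripts/legacy/extract_class_skills_v3.py | get_dam_generic
-- ===== SOURCE A (Python) =====
-- def get_dam_generic(s, lvl, prefix):
--     try:
--         base = int(s.get(f'{prefix}', '0') or '0')
--         add = 0
--         for i in range(1, lvl):
--             if i < 8: add += int(s.get(f'{prefix}Lev1', '0') or '0')
--             elif i < 16: add += int(s.get(f'{prefix}Lev2', '0') or '0')
--             elif i < 22: add += int(s.get(f'{prefix}Lev3', '0') or '0')
--             elif i < 28: add += int(s.get(f'{prefix}Lev4', '0') or '0')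
--             else: add += int(s.get(f'{prefix}Lev5', '0') or '0')
--         return base + add
--     except: return 0
-- ===== SOURCE B (Python) =====
-- def get_dam_generic(s, lvl, prefix):
--     # closed form: count how many i in range(1, lvl) fall in each level bucket,
--     # parse only the buckets actually reached
--     buckets = [
--         ('Lev1', max(0, min(lvl - 1, 7))),
--         ('Lev2', max(0, min(lvl - 8, 8))),
--         ('Lev3', max(0, min(lvl - 16, 6))),
--         ('Lev4', max(0, min(lvl - 22, 6))),
--         ('Lev5', max(0, lvl - 28)),
--     ]
--     try:
--         total = int(s.get(prefix, '0') or '0')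
--         for suffix, c in buckets:
--             if c > 0:
--                 total += c * int(s.get(prefix + suffix, '0') or '0')
--         return total
--     except ValueError:
--         return 0
-- ===== Notes on version B (the rewrite author's own statement) =====
-- stated objective: faster
-- what changed: Replaces the O(lvl) loop over range(1, lvl) with a closed-form count of levels per bucket, multiplying each bucket's parsed increment by its count and parsing only buckets that are actually reached.
import Mathlib
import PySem

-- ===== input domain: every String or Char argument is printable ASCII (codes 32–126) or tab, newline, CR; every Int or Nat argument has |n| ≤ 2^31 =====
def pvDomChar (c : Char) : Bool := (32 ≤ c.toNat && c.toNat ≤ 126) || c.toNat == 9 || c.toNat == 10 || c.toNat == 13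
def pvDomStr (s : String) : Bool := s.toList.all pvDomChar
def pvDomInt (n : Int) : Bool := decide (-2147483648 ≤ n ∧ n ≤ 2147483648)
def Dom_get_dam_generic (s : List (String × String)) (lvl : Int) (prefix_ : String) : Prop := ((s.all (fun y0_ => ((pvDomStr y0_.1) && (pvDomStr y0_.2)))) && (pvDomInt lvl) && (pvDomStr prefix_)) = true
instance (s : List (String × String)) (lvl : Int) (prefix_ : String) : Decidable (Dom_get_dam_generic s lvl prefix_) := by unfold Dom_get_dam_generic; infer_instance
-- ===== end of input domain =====

-- B replaces A's per-level loop by closed-form bucket counts (asymptotically faster);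
-- both turn any int() ValueError into the result 0, so both are total and agree everywhere.

-- shared primitive: s.get(key, '0') on the association list (first match), then `or '0'`, then int()
def pvGetVal (s : List (String × String)) (key : String) : Option Int :=
  let v := match s.find? (fun p => p.1 == key) with
           | some p => p.2
           | none => "0"
  PySem.Int.ofStr? (if v == "" then "0" else v)

-- ===== PORT A =====
-- the body of A's for-loop: value added at level i (none = int() raised)
def pvStepA (s : List (String × String)) (prefix_ : String) (i : Int) : Option Int :=
  if i < 8 then pvGetVal s (prefix_ ++ "Lev1")
  else if i < 16 then pvGetVal s (prefix_ ++ "Lev2")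
  else if i < 22 then pvGetVal s (prefix_ ++ "Lev3")
  else if i < 28 then pvGetVal s (prefix_ ++ "Lev4")
  else pvGetVal s (prefix_ ++ "Lev5")

-- A's for-loop over the remaining levels, accumulator `add`; none = exception escaped the loop
def pvLoopA (s : List (String × String)) (prefix_ : String) : List Int → Int → Option Int
  | [], add => some add
  | i :: rest, add =>
    match pvStepA s prefix_ i with
    | none => none
    | some v => pvLoopA s prefix_ rest (add + v)

def get_dam_generic (s : List (String × String)) (lvl : Int) (prefix_ : String) : Int :=
  match pvGetVal s prefix_ with
  | none => 0                                  -- except: return 0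
  | some base =>
    match pvLoopA s prefix_ (PySem.List.pyRange 1 lvl 1) 0 with
    | none => 0                                -- except: return 0
    | some add => base + add

-- ===== PORT B =====
-- B's loop over the five (suffix, count) bucket pairs, accumulator `total`
def pvLoopB (s : List (String × String)) (prefix_ : String) : List (String × Int) → Int → Option Int
  | [], total => some total
  | (suffix, c) :: rest, total =>
    if c > 0 then
      match pvGetVal s (prefix_ ++ suffix) with
      | none => none
      | some v => pvLoopB s prefix_ rest (total + c * v)
    else pvLoopB s prefix_ rest total

def get_dam_generic_alt (s : List (String × String)) (lvl : Int) (prefix_ : String) : Int :=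
  let buckets : List (String × Int) :=
    [("Lev1", max 0 (min (lvl - 1) 7)),
     ("Lev2", max 0 (min (lvl - 8) 8)),
     ("Lev3", max 0 (min (lvl - 16) 6)),
     ("Lev4", max 0 (min (lvl - 22) 6)),
     ("Lev5", max 0 (lvl - 28))]
  match pvGetVal s prefix_ with
  | none => 0                                  -- except ValueError: return 0
  | some total =>
    match pvLoopB s prefix_ buckets total with
    | none => 0
    | some t => t

-- ===== PRECONDITION & SPEC =====
-- A never raises (bare except), so there is no Pre_.
def Spec_get_dam_generic (s : List (String × String)) (lvl : Int) (prefix_ : String) (out : Int) : Prop := out = get_dam_generic_alt s lvl prefix_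
instance (s : List (String × String)) (lvl : Int) (prefix_ : String) (out : Int) : Decidable (Spec_get_dam_generic s lvl prefix_ out) := by unfold Spec_get_dam_generic; infer_instance

-- ===== CLAIM =====
def Claim_equal_get_dam_generic : Prop := ∀ (s : List (String × String)) (lvl : Int) (prefix_ : String), Dom_get_dam_generic s lvl prefix_ → Spec_get_dam_generic s lvl prefix_ (get_dam_generic s lvl prefix_)

-- ===== LEMMAS AND PROOFS =====

theorem pvLoopA_append (s : List (String × String)) (prefix_ : String) (xs ys : List Int) (add : Int) :
    pvLoopA s prefix_ (xs ++ ys) add =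
      match pvLoopA s prefix_ xs add with
      | none => none
      | some a => pvLoopA s prefix_ ys a := by
  induction xs generalizing add with
  | nil => simp [pvLoopA]
  | cons x rest ih =>
    simp only [List.cons_append, pvLoopA]
    cases pvStepA s prefix_ x with
    | none => rfl
    | some v => exact ih (add + v)

-- a homogeneous segment: every level in xs selects the same option value v
theorem pvLoopA_const (s : List (String × String)) (prefix_ : String) (xs : List Int)
    (v : Option Int) (h : ∀ i ∈ xs, pvStepA s prefix_ i = v) (add : Int) :
    pvLoopA s prefix_ xs add =
      if xs.length = 0 then some add
      else v.map (fun w => add + (xs.length : Int) * w) := by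
  induction xs generalizing add with
  | nil => simp [pvLoopA]
  | cons x rest ih =>
    simp only [pvLoopA, h x (List.mem_cons_self), List.length_cons]
    cases v with
    | none => rfl
    | some w =>
      simp only [Option.map_some]
      rw [ih (fun i hi => h i (List.mem_cons_of_mem _ hi))]
      by_cases hl : rest.length = 0
      · simp [hl]
      · simp only [if_neg hl, if_neg (by omega : ¬ rest.length + 1 = 0), Option.map_some,
          Option.some.injEq]
        push_cast
        ring

-- adding a constant to the start accumulator commutes with A's loop
theorem pvLoopA_shift (s : List (String × String)) (prefix_ : String) (xs : List Int)
    (b : Int) : ∀ t, pvLoopA s prefix_ xs (b + t) = (pvLoopA s prefix_ xs t).map (fun x => b + x) := by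
  induction xs with
  | nil => intro t; simp [pvLoopA]
  | cons x rest ih =>
    intro t
    simp only [pvLoopA]
    cases pvStepA s prefix_ x with
    | none => rfl
    | some v =>
      change pvLoopA s prefix_ rest (b + t + v)
        = Option.map (fun x => b + x) (pvLoopA s prefix_ rest (t + v))
      rw [show b + t + v = b + (t + v) by ring]
      exact ih (t + v)

-- A's segmented loop written as a chain over (suffix, segment length) pairs
def pvChainA (s : List (String × String)) (p : String) : List (String × Nat) → Int → Option Int
  | [], acc => some acc
  | (suf, L) :: rest, acc =>
    match (if L = 0 then some acc
           else (pvGetVal s (p ++ suf)).map (fun w => acc + (L : Int) * w)) with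
    | none => none
    | some a => pvChainA s p rest a

-- B's loop equals A's chain when each bucket count equals the segment length
theorem pvLoopB_eq_chainA (s : List (String × String)) (p : String) :
    ∀ (tr : List (String × Int × Nat)), (∀ t ∈ tr, ((t.2.2 : Int) = t.2.1)) → ∀ acc,
    pvLoopB s p (tr.map (fun t => (t.1, t.2.1))) acc
      = pvChainA s p (tr.map (fun t => (t.1, t.2.2))) acc := by
  intro tr
  induction tr with
  | nil => intro _ acc; simp [pvLoopB, pvChainA]
  | cons t rest ih =>
    intro h acc
    obtain ⟨suf, c, L⟩ := t
    have hL : (L : Int) = c := h _ List.mem_cons_self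
    have hrest := fun t ht => h t (List.mem_cons_of_mem _ ht)
    simp only [List.map_cons, pvLoopB, pvChainA]
    by_cases hc : c > 0
    · rw [if_pos hc, if_neg (by omega)]
      cases hv : pvGetVal s (p ++ suf) with
      | none => rfl
      | some w =>
        simp only [Option.map_some]
        rw [← hL]
        exact ih hrest (acc + (L : Int) * w)
    · rw [if_neg hc, if_pos (by omega)]
      exact ih hrest acc

theorem get_dam_generic_spec : Claim_equal_get_dam_generic := by
  intro s lvl prefix_ _
  unfold Spec_get_dam_generic get_dam_generic get_dam_generic_alt
  cases hbase : pvGetVal s prefix_ with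
  | none => rfl
  | some base =>
    -- the chain A's loop reduces to
    have hBC := pvLoopB_eq_chainA s prefix_
      [("Lev1", max 0 (min (lvl - 1) 7), (min lvl 8 - 1).toNat),
       ("Lev2", max 0 (min (lvl - 8) 8), (min lvl 16 - min lvl 8).toNat),
       ("Lev3", max 0 (min (lvl - 16) 6), (min lvl 22 - min lvl 16).toNat),
       ("Lev4", max 0 (min (lvl - 22) 6), (min lvl 28 - min lvl 22).toNat),
       ("Lev5", max 0 (lvl - 28), (lvl - min lvl 28).toNat)]
      (by intro t ht
          simp only [List.mem_cons, List.not_mem_nil, or_false] at ht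
          rcases ht with h | h | h | h | h <;> subst h <;> simp <;> omega)
      base
    simp only [List.map_cons, List.map_nil] at hBC
    have hAC : ∀ acc, pvLoopA s prefix_ (PySem.List.pyRange 1 lvl 1) acc
        = pvChainA s prefix_
            [("Lev1", (min lvl 8 - 1).toNat), ("Lev2", (min lvl 16 - min lvl 8).toNat),
             ("Lev3", (min lvl 22 - min lvl 16).toNat), ("Lev4", (min lvl 28 - min lvl 22).toNat),
             ("Lev5", (lvl - min lvl 28).toNat)] acc := by
      intro acc
      by_cases hl : lvl ≤ 1
      · rw [PySem.List.pyRange_one_eq_nil (by omega)]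
        have z1 : (min lvl 8 - 1).toNat = 0 := by omega
        have z2 : (min lvl 16 - min lvl 8).toNat = 0 := by omega
        have z3 : (min lvl 22 - min lvl 16).toNat = 0 := by omega
        have z4 : (min lvl 28 - min lvl 22).toNat = 0 := by omega
        have z5 : (lvl - min lvl 28).toNat = 0 := by omega
        simp [pvLoopA, pvChainA, z1, z2, z3, z4, z5]
      · rw [PySem.List.pyRange_one_append 1 (min lvl 8) lvl (by omega) (by omega),
            PySem.List.pyRange_one_append (min lvl 8) (min lvl 16) lvl (by omega) (by omega),
            PySem.List.pyRange_one_append (min lvl 16) (min lvl 22) lvl (by omega) (by omega),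
            PySem.List.pyRange_one_append (min lvl 22) (min lvl 28) lvl (by omega) (by omega)]
        have e1 := fun a => pvLoopA_const s prefix_ (PySem.List.pyRange 1 (min lvl 8) 1)
          (pvGetVal s (prefix_ ++ "Lev1"))
          (by intro i hi; rw [PySem.List.mem_pyRange_one] at hi
              simp only [pvStepA]; rw [if_pos (by omega)]) a
        have e2 := fun a => pvLoopA_const s prefix_ (PySem.List.pyRange (min lvl 8) (min lvl 16) 1)
          (pvGetVal s (prefix_ ++ "Lev2"))
          (by intro i hi; rw [PySem.List.mem_pyRange_one] at hi
              simp only [pvStepA]; rw [if_neg (by omega), if_pos (by omega)]) a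
        have e3 := fun a => pvLoopA_const s prefix_ (PySem.List.pyRange (min lvl 16) (min lvl 22) 1)
          (pvGetVal s (prefix_ ++ "Lev3"))
          (by intro i hi; rw [PySem.List.mem_pyRange_one] at hi
              simp only [pvStepA]; rw [if_neg (by omega), if_neg (by omega), if_pos (by omega)]) a
        have e4 := fun a => pvLoopA_const s prefix_ (PySem.List.pyRange (min lvl 22) (min lvl 28) 1)
          (pvGetVal s (prefix_ ++ "Lev4"))
          (by intro i hi; rw [PySem.List.mem_pyRange_one] at hi
              simp only [pvStepA]
              rw [if_neg (by omega), if_neg (by omega), if_neg (by omega), if_pos (by omega)]) a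
        have e5 := fun a => pvLoopA_const s prefix_ (PySem.List.pyRange (min lvl 28) lvl 1)
          (pvGetVal s (prefix_ ++ "Lev5"))
          (by intro i hi; rw [PySem.List.mem_pyRange_one] at hi
              simp only [pvStepA]
              rw [if_neg (by omega), if_neg (by omega), if_neg (by omega), if_neg (by omega)]) a
        have hid : ∀ (x : Option Int), (match x with | none => none | some a => some a) = x :=
          fun x => by cases x <;> rfl
        simp only [pvLoopA_append, e1, e2, e3, e4, e5, PySem.List.length_pyRange_one, pvChainA,
          hid]
    have hshift := pvLoopA_shift s prefix_ (PySem.List.pyRange 1 lvl 1) base 0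
    rw [add_zero] at hshift
    have hkey : pvLoopB s prefix_
        [("Lev1", max 0 (min (lvl - 1) 7)), ("Lev2", max 0 (min (lvl - 8) 8)),
         ("Lev3", max 0 (min (lvl - 16) 6)), ("Lev4", max 0 (min (lvl - 22) 6)),
         ("Lev5", max 0 (lvl - 28))] base
        = (pvLoopA s prefix_ (PySem.List.pyRange 1 lvl 1) 0).map (fun x => base + x) := by
      rw [hBC, ← hAC base, hshift]
    show (match pvLoopA s prefix_ (PySem.List.pyRange 1 lvl 1) 0 with
          | none => 0
          | some add => base + add)
        = (match pvLoopB s prefix_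
              [("Lev1", max 0 (min (lvl - 1) 7)), ("Lev2", max 0 (min (lvl - 8) 8)),
               ("Lev3", max 0 (min (lvl - 16) 6)), ("Lev4", max 0 (min (lvl - 22) 6)),
               ("Lev5", max 0 (lvl - 28))] base with
          | none => 0
          | some t => t)
    rw [hkey]
    cases pvLoopA s prefix_ (PySem.List.pyRange 1 lvl 1) 0 <;> rfl
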